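-- pv_equiv track=rewrite | github.com/commonsense/conceptdb | conceptdb/util.py | outer_iter
-- ===== SOURCE A (Python) =====
-- def outer_iter(seqs):
--     """
--     Gives an iterator over the outer product of a number of sequences.
--     """
--     if len(seqs) == 0:
--         yield ()
--         return
--     else:
--         head = seqs[0]
--         tail = seqs[1:]
--         for tailseq in outer_iter(tail):
--             for item in head:
--                 yield (item,) + tailseq
-- ===== SOURCE B (Python) =====
-- import itertools
--
-- def outer_iter(seqs):
--     """
--     Gives an iterator over the outer product of a number of sequences.
--     """
--     for t in itertools.product(*reversed(list(seqs))):
--         yield tuple(reversed(t))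
-- ===== Notes on version B (the rewrite author's own statement) =====
-- stated objective: idiomatic
-- what changed: Replaced the hand-written recursive generator with itertools.product over the reversed sequence list, reversing each tuple to restore A's leftmost-fastest order.
import Mathlib
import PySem

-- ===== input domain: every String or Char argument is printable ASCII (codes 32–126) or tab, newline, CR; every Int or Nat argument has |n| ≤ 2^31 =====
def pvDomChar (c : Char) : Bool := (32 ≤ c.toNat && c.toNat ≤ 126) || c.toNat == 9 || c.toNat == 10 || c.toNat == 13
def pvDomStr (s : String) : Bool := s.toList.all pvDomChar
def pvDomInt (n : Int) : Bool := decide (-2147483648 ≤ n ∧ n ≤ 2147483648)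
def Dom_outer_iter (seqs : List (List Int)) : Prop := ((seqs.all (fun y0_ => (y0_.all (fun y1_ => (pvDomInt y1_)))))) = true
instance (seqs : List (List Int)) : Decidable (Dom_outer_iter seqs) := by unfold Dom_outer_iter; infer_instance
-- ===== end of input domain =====

-- B replaces A's recursive generator with itertools.product over reversed sequences (tuples reversed back): same values, idiomatic.


-- ===== PORT A =====
-- A recurses on the tail; for each product of the tail it prepends each head item (leftmost-fastest).
def outer_iter (seqs : List (List Int)) : List (List Int) :=
  match seqs with
  | [] => [[]]
  | head :: tail =>
      (outer_iter tail).flatMap (fun tailseq => head.map (fun item => item :: tailseq))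

-- ===== PORT B =====
-- itertools.product: rightmost sequence varies fastest.
def pvProduct (seqs : List (List Int)) : List (List Int) :=
  match seqs with
  | [] => [[]]
  | h :: t => h.flatMap (fun x => (pvProduct t).map (fun p => x :: p))

-- B: product of the reversed sequence list, each resulting tuple reversed.
def outer_iter_alt (seqs : List (List Int)) : List (List Int) :=
  (pvProduct seqs.reverse).map List.reverse

-- ===== PRECONDITION & SPEC =====
def Spec_outer_iter (seqs : List (List Int)) (out : List (List Int)) : Prop := out = outer_iter_alt seqs
instance (seqs : List (List Int)) (out : List (List Int)) : Decidable (Spec_outer_iter seqs out) := by unfold Spec_outer_iter; infer_instance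

-- ===== CLAIM (what is proved, stated in full; the proofs are below) =====
def Claim_equal_outer_iter : Prop := ∀ (seqs : List (List Int)), Dom_outer_iter seqs → Spec_outer_iter seqs (outer_iter seqs)

-- ===== LEMMAS AND PROOFS =====

-- ===== VERDICT (by name: the statement is the Claim_ definition above) =====
lemma pvProduct_append_one (l : List (List Int)) (h : List Int) :
    pvProduct (l ++ [h]) = (pvProduct l).flatMap (fun p => h.map (fun x => p ++ [x])) := by
  induction l with
  | nil => induction h with | nil => rfl | cons x h ihh => simp [pvProduct, List.flatMap_cons] at *; simpa using ihh
  | cons a l ih =>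
      simp only [List.cons_append, pvProduct, ih, List.flatMap_assoc, List.map_flatMap,
        List.flatMap_map, List.map_map, Function.comp_def]

lemma outer_iter_eq_alt (seqs : List (List Int)) : outer_iter seqs = outer_iter_alt seqs := by
  induction seqs with
  | nil => rfl
  | cons h t ih =>
      simp only [outer_iter, outer_iter_alt, List.reverse_cons, pvProduct_append_one,
        List.map_flatMap, List.map_map, Function.comp_def, List.reverse_append,
        List.reverse_nil, List.nil_append] at *
      rw [ih]
      simp [List.flatMap_map]

theorem outer_iter_spec : Claim_equal_outer_iter := by
  intro seqs _
  exact outer_iter_eq_alt seqs
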